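-- pv_equiv track=rewrite | github.com/tkddls23/BaekJoon | haeram/python/pg_133502.py | solution
-- ===== SOURCE A (Python) =====
-- def solution(ingredient):
--     stk = []
--
--     ans = 0
--     for i in ingredient:
--         stk.append(i)
--
--         if len(stk) < 4:
--             continue
--
--         if stk[-4:] == [1, 2, 3, 1]:
--             for _ in range(4):
--                 stk.pop()
--
--             ans += 1
--
--     return ans
-- ===== SOURCE B (Python) =====
-- # B: repeated scan-and-remove of the contiguous pattern [1,2,3,1] until no
-- # occurrence remains, counting removals; same count as A's one-pass stack.
-- def _remove_first(work):
--     # work with its first contiguous occurrence of [1,2,3,1] removed, else None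
--     for i in range(len(work) - 3):
--         if work[i:i + 4] == [1, 2, 3, 1]:
--             return work[:i] + work[i + 4:]
--     return None
--
-- def solution(ingredient):
--     work = list(ingredient)
--     ans = 0
--     while True:
--         nxt = _remove_first(work)
--         if nxt is None:
--             return ans
--         work = nxt
--         ans += 1
-- ===== Notes on version B (the rewrite author's own statement) =====
-- stated objective: alternative
-- what changed: Replaces A's single-pass stack (push each element, pop and count when the top four are [1,2,3,1]) by a fixed-point rewriter: repeatedly scan the list for the first contiguous occurrence of [1,2,3,1], delete it and restart, returning the number of deletions.
import Mathlib
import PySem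

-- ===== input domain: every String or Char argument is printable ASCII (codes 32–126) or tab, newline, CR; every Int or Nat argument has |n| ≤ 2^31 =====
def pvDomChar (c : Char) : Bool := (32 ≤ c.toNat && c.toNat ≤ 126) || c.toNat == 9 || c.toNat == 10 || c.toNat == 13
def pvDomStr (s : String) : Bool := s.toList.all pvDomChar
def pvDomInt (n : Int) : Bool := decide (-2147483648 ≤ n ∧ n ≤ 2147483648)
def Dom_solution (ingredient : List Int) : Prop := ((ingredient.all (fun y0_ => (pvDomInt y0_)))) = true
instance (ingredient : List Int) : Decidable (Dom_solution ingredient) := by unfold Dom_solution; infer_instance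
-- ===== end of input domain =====

-- B replaces A's one-pass stack by a fixed-point rewriter (repeatedly delete the first
-- contiguous [1,2,3,1] and count deletions); an alternative decomposition, not faster.

-- ===== PORT A =====
-- one loop iteration of A: stk.append(i); if len(stk)>=4 and stk[-4:]==[1,2,3,1]: pop 4, ans += 1
def stepA (st : List Int × Int) (x : Int) : List Int × Int :=
  let stk := st.1 ++ [x]
  if stk.length < 4 then (stk, st.2)
  else if PySem.List.slice stk (some (-4)) none = [1, 2, 3, 1] then
    -- for _ in range(4): stk.pop()
    ((List.range 4).foldl (fun s _ => s.dropLast) stk, st.2 + 1)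
  else (stk, st.2)

def solution (ingredient : List Int) : Int :=
  (ingredient.foldl stepA ([], 0)).2

-- ===== PORT B =====
-- _remove_first: scan left to right; the list with its first contiguous [1,2,3,1] deleted, or none
def removeFirst : List Int → Option (List Int)
  | [] => none
  | x :: xs =>
    if (x :: xs).take 4 = [1, 2, 3, 1] then some ((x :: xs).drop 4)
    else (removeFirst xs).map (x :: ·)

-- termination measure for B's while-loop: each deletion shortens the list
theorem removeFirst_some_length : ∀ {l l' : List Int}, removeFirst l = some l' → l'.length < l.length := by
  intro l
  induction l with
  | nil => intro l' h; simp [removeFirst] at h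
  | cons x xs ih =>
    intro l' h
    simp only [removeFirst] at h
    by_cases htake : (x :: xs).take 4 = [1, 2, 3, 1]
    · rw [if_pos htake] at h
      have h4 : 4 ≤ xs.length + 1 := by
        have := congrArg List.length htake
        simp [List.length_take] at this
        omega
      injection h with h
      subst h
      simp only [List.length_drop, List.length_cons]
      omega
    · rw [if_neg htake] at h
      cases hrf : removeFirst xs with
      | none => rw [hrf] at h; simp at h
      | some xs' =>
        rw [hrf] at h
        simp at h
        have := ih hrf
        simp [← h]
        omega

-- the while-loop of B: delete and count until no occurrence remains
def altLoop (work : List Int) (ans : Int) : Int :=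
  match h : removeFirst work with
  | none => ans
  | some nxt => altLoop nxt (ans + 1)
termination_by work.length
decreasing_by exact removeFirst_some_length h

def solution_alt (ingredient : List Int) : Int := altLoop ingredient 0

-- ===== PRECONDITION & SPEC =====
def Spec_solution (ingredient : List Int) (out : Int) : Prop := out = solution_alt ingredient
instance (ingredient : List Int) (out : Int) : Decidable (Spec_solution ingredient out) := by unfold Spec_solution; infer_instance

-- ===== CLAIM (what is proved, stated in full; the proofs are below) =====
def Claim_equal_solution : Prop := ∀ (ingredient : List Int), Dom_solution ingredient → Spec_solution ingredient (solution ingredient)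

-- ===== LEMMAS AND PROOFS =====

-- popping four times from a stack ending in [1,2,3,1] leaves the rest
theorem pop4 (u : List Int) :
    (List.range 4).foldl (fun s _ => s.dropLast) (u ++ [1, 2, 3, 1]) = u := by
  have h : u ++ [1, 2, 3, 1] = (((u ++ [1]) ++ [2]) ++ [3]) ++ [1] := by simp
  simp only [List.range_succ, List.range_zero, List.nil_append, List.foldl_append,
    List.foldl_cons, List.foldl_nil, h, List.dropLast_concat]

theorem slice_suffix (stk : List Int) (h : ¬ stk.length < 4) :
    (PySem.List.slice stk (some (-4)) none = [1, 2, 3, 1]) ↔ ∃ u, stk = u ++ [1, 2, 3, 1] := by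
  rw [PySem.List.slice_from_neg_ofNat stk 4 (by omega)]
  constructor
  · intro hd
    exact ⟨stk.take (stk.length - 4), by rw [← hd]; exact (List.take_append_drop _ _).symm⟩
  · rintro ⟨u, rfl⟩
    have hlen : (u ++ [1, 2, 3, 1]).length - 4 = u.length := by simp
    rw [hlen, List.drop_left]

theorem stepA_nopop (s : List Int) (a : Int) (x : Int)
    (h : ∀ u, s ++ [x] ≠ u ++ [1, 2, 3, 1]) : stepA (s, a) x = (s ++ [x], a) := by
  simp only [stepA]
  by_cases hl : (s ++ [x]).length < 4
  · rw [if_pos hl]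
  · rw [if_neg hl, if_neg ?_]
    intro hc
    obtain ⟨u, hu⟩ := (slice_suffix (s ++ [x]) hl).mp hc
    exact h u hu

theorem stepA_pop (u : List Int) (a : Int) :
    stepA (u ++ [1, 2, 3], a) 1 = (u, a + 1) := by
  simp only [stepA]
  have he : (u ++ [1, 2, 3] : List Int) ++ [1] = u ++ [1, 2, 3, 1] := by simp
  have hl : ¬ ((u ++ [1, 2, 3] : List Int) ++ [1]).length < 4 := by simp
  have hs : PySem.List.slice ((u ++ [1, 2, 3] : List Int) ++ [1]) (some (-4)) none = [1, 2, 3, 1] := by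
    rw [he]
    exact (slice_suffix _ (by simp)).mpr ⟨u, rfl⟩
  rw [if_neg hl, if_pos hs, he, pop4]

-- a run during which no prefix of the remaining input completes a [1,2,3,1] suffix just pushes
theorem run_nopop : ∀ (l s : List Int) (a : Int),
    (∀ p q u, l = p ++ q → p ≠ [] → s ++ p ≠ u ++ [1, 2, 3, 1]) →
    l.foldl stepA (s, a) = (s ++ l, a) := by
  intro l
  induction l with
  | nil => intro s a _; simp
  | cons x rest ih =>
    intro s a h
    have h1 : stepA (s, a) x = (s ++ [x], a) :=
      stepA_nopop s a x (fun u => h [x] rest u rfl (by simp))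
    have h2 := ih (s ++ [x]) a
      (fun p q u hpq hp hc => h (x :: p) q u (by simp [hpq]) (by simp) (by simpa using hc))
    rw [List.foldl_cons, h1, h2]
    simp

theorem removeFirst_none_no_occ : ∀ {l : List Int}, removeFirst l = none →
    ∀ u v, l ≠ u ++ [1, 2, 3, 1] ++ v := by
  intro l
  induction l with
  | nil => intro _ u v h; simp at h
  | cons x xs ih =>
    intro h u v hc
    simp only [removeFirst] at h
    by_cases htake : (x :: xs).take 4 = [1, 2, 3, 1]
    · rw [if_pos htake] at h; simp at h
    · rw [if_neg htake] at h
      cases u with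
      | nil =>
        simp only [List.nil_append] at hc
        exact htake (by rw [hc]; rfl)
      | cons y u' =>
        have hc' : x :: xs = y :: (u' ++ [1, 2, 3, 1] ++ v) := hc
        injection hc' with _ hc2
        cases hrf : removeFirst xs with
        | none => exact ih hrf u' v hc2
        | some xs' => rw [hrf] at h; simp at h

theorem removeFirst_some_decomp : ∀ {l l' : List Int}, removeFirst l = some l' →
    ∃ u v, l = u ++ [1, 2, 3, 1] ++ v ∧ l' = u ++ v ∧
      (∀ w z, l = w ++ [1, 2, 3, 1] ++ z → u.length ≤ w.length) := by
  intro l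
  induction l with
  | nil => intro l' h; simp [removeFirst] at h
  | cons x xs ih =>
    intro l' h
    simp only [removeFirst] at h
    by_cases htake : (x :: xs).take 4 = [1, 2, 3, 1]
    · rw [if_pos htake] at h
      injection h with h
      refine ⟨[], (x :: xs).drop 4, ?_, by simp [← h], fun w z _ => by simp⟩
      conv_lhs => rw [← List.take_append_drop 4 (x :: xs)]
      rw [htake]; simp
    · rw [if_neg htake] at h
      cases hrf : removeFirst xs with
      | none => rw [hrf] at h; simp at h
      | some xs' =>
        rw [hrf] at h
        simp at h
        obtain ⟨u, v, hu1, hu2, hmin⟩ := ih hrf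
        refine ⟨x :: u, v, by simp [hu1], by simp [← h, hu2], ?_⟩
        intro w z hw
        cases w with
        | nil =>
          simp only [List.nil_append] at hw
          exact absurd (by rw [hw]; rfl) htake
        | cons y w' =>
          have hw' : x :: xs = y :: (w' ++ [1, 2, 3, 1] ++ z) := hw
          injection hw' with _ hw2
          have := hmin w' z hw2
          simp only [List.length_cons]
          omega

-- if l has no occurrence, A's stack never pops: the fold just rebuilds l
theorem fold_none {l : List Int} (h : removeFirst l = none) (a : Int) :
    l.foldl stepA ([], a) = (l, a) := by
  have hcond : ∀ p q u, l = p ++ q → p ≠ [] → ([] : List Int) ++ p ≠ u ++ [1, 2, 3, 1] := by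
    intro p q u hpq hp hc
    simp only [List.nil_append] at hc
    exact removeFirst_none_no_occ h u q (by rw [hpq, hc])
  simpa using run_nopop l [] a hcond

-- deleting the first occurrence commutes with A's stack run, costing exactly one count
theorem fold_step {l l' : List Int} (h : removeFirst l = some l') (a : Int) :
    l.foldl stepA ([], a) = l'.foldl stepA ([], a + 1) := by
  obtain ⟨u, v, hl, hl', hmin⟩ := removeFirst_some_decomp h
  -- no pop while processing u (from the empty stack)
  have hu : ∀ a' : Int, u.foldl stepA ([], a') = (u, a') := by
    intro a'
    have hcond : ∀ p q w, u = p ++ q → p ≠ [] → ([] : List Int) ++ p ≠ w ++ [1, 2, 3, 1] := by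
      intro p q w hpq hp hc
      simp only [List.nil_append] at hc
      have hdecomp : l = w ++ [1, 2, 3, 1] ++ (q ++ [1, 2, 3, 1] ++ v) := by
        rw [hl, hpq, hc]; simp
      have hle := hmin _ _ hdecomp
      have e1 : p.length = w.length + 4 := by rw [hc]; simp
      have e2 : u.length = p.length + q.length := by rw [hpq]; simp
      have e3 : 1 ≤ p.length := by
        cases p with
        | nil => exact absurd rfl hp
        | cons _ _ => simp
      omega
    simpa using run_nopop u [] a' hcond
  -- no pop while processing [1,2,3] on top of stack u
  have h123 : ([1, 2, 3] : List Int).foldl stepA (u, a) = (u ++ [1, 2, 3], a) :=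
    run_nopop [1, 2, 3] u a (by
      intro p q w hpq hp hc
      have hdecomp : l = w ++ [1, 2, 3, 1] ++ (q ++ [1] ++ v) := by
        calc l = (u ++ p) ++ (q ++ [1] ++ v) := by
              rw [hl, show ([1, 2, 3, 1] : List Int) = [1, 2, 3] ++ [1] from rfl, hpq]; simp
          _ = w ++ [1, 2, 3, 1] ++ (q ++ [1] ++ v) := by rw [hc]
      have hle := hmin _ _ hdecomp
      have e1 := congrArg List.length hc
      have e2 := congrArg List.length hpq
      simp at e1 e2
      omega)
  calc l.foldl stepA ([], a)
      = (1 :: v).foldl stepA (u ++ [1, 2, 3], a) := by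
        rw [hl]
        have hsplit : u ++ [1, 2, 3, 1] ++ v = u ++ ([1, 2, 3] ++ (1 :: v)) := by simp
        rw [hsplit, List.foldl_append, hu a, List.foldl_append, h123]
    _ = v.foldl stepA (u, a + 1) := by
        rw [List.foldl_cons, stepA_pop]
    _ = l'.foldl stepA ([], a + 1) := by
        rw [hl', List.foldl_append, hu (a + 1)]

theorem fold_eq_altLoop : ∀ (l : List Int) (a : Int), (l.foldl stepA ([], a)).2 = altLoop l a := by
  intro l
  induction l using (measure List.length).wf.induction with
  | _ l ih =>
    intro a
    rw [altLoop]
    cases h : removeFirst l with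
    | none => rw [fold_none h]
    | some l' =>
      rw [fold_step h a]
      exact ih l' (removeFirst_some_length h) (a + 1)

-- ===== VERDICT (by name: the statement is the Claim_ definition above) =====
theorem solution_spec : Claim_equal_solution := by
  intro l _
  unfold Spec_solution solution solution_alt
  exact fold_eq_altLoop l 0
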